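-- pv_equiv track=rewrite | github.com/mverschu/ghostSPN | ghostSPN.py | detect_duplicate_spns
-- ===== SOURCE A (Python) =====
-- from typing import Dict, List, Set
--
-- def detect_duplicate_spns(all_spn_entries: List[Dict]) -> Dict[str, List[Dict]]:
--     mapping = {}
--     for e in all_spn_entries:
--         mapping.setdefault(e['spn'], []).append({
--             'account_dn': e['account_dn'],
--             'account_sam': e.get('account_sam')
--         })
--     return {k: v for k, v in mapping.items() if len(v) > 1}
-- ===== SOURCE B (Python) =====
-- def detect_duplicate_spns(all_spn_entries):
--     # No grouping table: for each first occurrence of an spn, collect its whole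
--     # group by a fresh scan of the input; keep it only if it has >1 members.
--     seen = []
--     result = {}
--     for e in all_spn_entries:
--         spn = e['spn']
--         if spn in seen:
--             continue
--         seen.append(spn)
--         group = [{'account_dn': x['account_dn'], 'account_sam': x.get('account_sam')}
--                  for x in all_spn_entries if x['spn'] == spn]
--         if len(group) > 1:
--             result[spn] = group
--     return result
-- ===== Notes on version B (the rewrite author's own statement) =====
-- stated objective: alternative
-- what changed: B drops A's hash-grouping pass entirely: it walks the list once over first occurrences and, for each new spn, gathers that spn's whole group by a fresh scan of the input (nested-scan, no grouping dict), keeping only groups of size > 1; key order (first appearance among duplicated spns) and group order are identical.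
import Mathlib
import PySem

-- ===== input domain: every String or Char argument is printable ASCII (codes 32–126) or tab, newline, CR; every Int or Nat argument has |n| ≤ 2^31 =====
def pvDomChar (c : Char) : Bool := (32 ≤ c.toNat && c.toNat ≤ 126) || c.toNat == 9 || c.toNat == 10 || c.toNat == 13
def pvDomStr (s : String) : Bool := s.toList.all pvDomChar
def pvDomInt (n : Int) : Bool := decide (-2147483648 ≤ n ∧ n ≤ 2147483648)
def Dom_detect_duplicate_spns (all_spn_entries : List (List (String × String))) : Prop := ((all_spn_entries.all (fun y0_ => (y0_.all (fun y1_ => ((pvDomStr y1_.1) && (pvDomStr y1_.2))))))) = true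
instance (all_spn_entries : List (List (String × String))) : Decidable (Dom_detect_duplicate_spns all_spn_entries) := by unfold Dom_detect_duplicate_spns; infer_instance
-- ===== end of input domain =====

-- B drops A's hash-grouping: it walks first occurrences and gathers each new spn's whole
-- group by a fresh scan of the input (objective: alternative; no grouping dict, same output).

-- ===== PORT A =====
-- field access e['spn'] / e['account_dn'] / e.get('account_sam') (assoc-list dict, first match);
-- the .getD "" default is never reached under Pre_ (the key is present there)
def pvKey (e : List (String × String)) : String :=
  ((PySem.Dict.mk e).get? "spn").getD ""
def pvRec (e : List (String × String)) : List (String × Option String) :=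
  [("account_dn", some (((PySem.Dict.mk e).get? "account_dn").getD "")),
   ("account_sam", (PySem.Dict.mk e).get? "account_sam")]

def detect_duplicate_spns (all_spn_entries : List (List (String × String))) : List (String × List (List (String × Option String))) :=
  let mapping := all_spn_entries.foldl
    (fun d e => d.modify (pvKey e) [] (fun v => v ++ [pvRec e]))
    PySem.Dict.empty
  (mapping.items).filter (fun kv => decide (1 < kv.2.length))

-- ===== PORT B =====
-- 'seen' is a Python list with append/membership; 'result' is a dict whose keys are inserted
-- at most once each (spn ∉ seen when inserted), so insertion is exactly appending the pair.
def detect_duplicate_spns_alt (all_spn_entries : List (List (String × String))) : List (String × List (List (String × Option String))) :=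
  (all_spn_entries.foldl
    (fun (st : List String × List (String × List (List (String × Option String)))) e =>
      let spn := pvKey e
      if st.1.contains spn then st
      else
        let group := (all_spn_entries.filter (fun x => pvKey x == spn)).map pvRec
        (st.1 ++ [spn], if 1 < group.length then st.2 ++ [(spn, group)] else st.2))
    ([], [])).2

-- ===== PRECONDITION & SPEC =====
-- A raises KeyError when an entry lacks the 'spn' or 'account_dn' key; exactly those inputs are excluded.
def Pre_detect_duplicate_spns (all_spn_entries : List (List (String × String))) : Prop :=
  ∀ e ∈ all_spn_entries,
    ((PySem.Dict.mk e).get? "spn").isSome = true ∧ ((PySem.Dict.mk e).get? "account_dn").isSome = true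
instance (all_spn_entries : List (List (String × String))) : Decidable (Pre_detect_duplicate_spns all_spn_entries) := by unfold Pre_detect_duplicate_spns; infer_instance
def pvWitness_detect_duplicate_spns : (List (List (String × String))) :=
  [[("spn", "a"), ("account_dn", "d1")], [("spn", "a"), ("account_dn", "d2"), ("account_sam", "s")]]

def Spec_detect_duplicate_spns (all_spn_entries : List (List (String × String))) (out : List (String × List (List (String × Option String)))) : Prop := out = detect_duplicate_spns_alt all_spn_entries
instance (all_spn_entries : List (List (String × String))) (out : List (String × List (List (String × Option String)))) : Decidable (Spec_detect_duplicate_spns all_spn_entries out) := by unfold Spec_detect_duplicate_spns; infer_instance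

-- ===== CLAIM (what is proved, stated in full; the proofs are below) =====
def Claim_equal_detect_duplicate_spns : Prop := ∀ (all_spn_entries : List (List (String × String))), Dom_detect_duplicate_spns all_spn_entries → Pre_detect_duplicate_spns all_spn_entries → Spec_detect_duplicate_spns all_spn_entries (detect_duplicate_spns all_spn_entries)

-- ===== LEMMAS AND PROOFS =====

-- the grouped value at key k is the records of the entries with that spn
theorem pv_group_getD (l : List (List (String × String))) (k : String) :
    (l.foldl (fun d e => d.modify (pvKey e) [] (fun v => v ++ [pvRec e])) PySem.Dict.empty).getD k []
      = (l.filter (fun e => pvKey e == k)).map pvRec := by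
  have h := PySem.Dict.getD_foldl_modify_append
    (l := l.map (fun e => (pvKey e, pvRec e)))
    (d := (PySem.Dict.empty : PySem.Dict String (List (List (String × Option String))))) (c := k)
  rw [List.foldl_map] at h
  simpa [PySem.Dict.getD_empty, List.filter_map, Function.comp, List.map_map] using h

-- the grouped keys are the distinct spns in first-appearance order
theorem pv_group_keys (l : List (List (String × String))) :
    (l.foldl (fun d e => d.modify (pvKey e) [] (fun v => v ++ [pvRec e])) PySem.Dict.empty).keys
      = PySem.Set.ofList (l.map pvKey) := by
  rw [PySem.Dict.keys_foldl_modify_key]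
  simp [PySem.Dict.keys_empty, PySem.Set.update_nil_left]

-- A's result in closed form: the duplicated keys (first-appearance order) paired with their groups
theorem pv_A_eq (xs : List (List (String × String))) :
    detect_duplicate_spns xs
      = ((PySem.Set.ofList (xs.map pvKey)).filter
            (fun k => decide (1 < ((xs.filter (fun e => pvKey e == k)).map pvRec).length))).map
          (fun k => (k, (xs.filter (fun e => pvKey e == k)).map pvRec)) := by
  simp only [detect_duplicate_spns]
  have hnd : (xs.foldl (fun d e => d.modify (pvKey e) [] (fun v => v ++ [pvRec e])) PySem.Dict.empty).keys.Nodup := by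
    rw [pv_group_keys]; exact PySem.Set.nodup_ofList _
  rw [PySem.Dict.items_eq_map_keys _ hnd [], List.filter_map, pv_group_keys]
  simp only [Function.comp_def, pv_group_getD]

-- loop invariant for B: with keys s already seen and output r accumulated, the fold over the
-- remainder appends the groups of the not-yet-seen duplicated keys in first-appearance order
theorem pv_B_inv (xs : List (List (String × String)))
    (l : List (List (String × String))) (s : List String)
    (r : List (String × List (List (String × Option String)))) :
    (l.foldl
      (fun (st : List String × List (String × List (List (String × Option String)))) e =>
        let spn := pvKey e
        if st.1.contains spn then st
        else
          let group := (xs.filter (fun x => pvKey x == spn)).map pvRec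
          (st.1 ++ [spn], if 1 < group.length then st.2 ++ [(spn, group)] else st.2))
      (s, r)).2
      = r ++ ((((PySem.Set.ofList (l.map pvKey)).filter (fun k => !s.contains k)).filter
            (fun k => decide (1 < ((xs.filter (fun e => pvKey e == k)).map pvRec).length))).map
          (fun k => (k, (xs.filter (fun e => pvKey e == k)).map pvRec))) := by
  induction l generalizing s r with
  | nil => simp [PySem.Set.ofList]
  | cons e l ih =>
    have hdis : ∀ (t : List String) (k : String), k ∈ s →
        (PySem.Set.discard t k).filter (fun y => !s.contains y)
          = t.filter (fun y => !s.contains y) := by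
      intro t k hk
      simp only [PySem.Set.discard, List.filter_filter]
      apply List.filter_congr
      intro a _
      by_cases h : a = k
      · subst h; simp [hk]
      · simp [h]
    by_cases hm : (pvKey e) ∈ s
    · simp only [List.foldl_cons]
      rw [if_pos (by simpa using hm)]
      rw [ih]
      congr 2
      rw [List.map_cons, PySem.Set.ofList_cons, List.filter_cons]
      have : (!s.contains (pvKey e)) = false := by simpa using hm
      rw [this]
      simp only [Bool.false_eq_true, if_false]
      rw [hdis _ _ hm]
    · simp only [List.foldl_cons]
      rw [if_neg (by simpa using hm)]
      have hrest : (PySem.Set.discard (PySem.Set.ofList (l.map pvKey)) (pvKey e)).filter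
            (fun y => !s.contains y)
          = (PySem.Set.ofList (l.map pvKey)).filter (fun y => !(s ++ [pvKey e]).contains y) := by
        simp only [PySem.Set.discard, List.filter_filter]
        apply List.filter_congr
        intro a _
        by_cases h : a = pvKey e
        · subst h; simp
        · simp [h]
      have hkeep : (!s.contains (pvKey e)) = true := by simpa using hm
      by_cases hg : 1 < ((xs.filter (fun x => pvKey x == pvKey e)).map pvRec).length
      · rw [if_pos hg, ih]
        rw [List.map_cons, PySem.Set.ofList_cons, List.filter_cons, hkeep]
        simp only [if_true]
        rw [List.filter_cons]
        have hd : decide (1 < ((xs.filter (fun x => pvKey x == pvKey e)).map pvRec).length) = true := by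
          simpa using hg
        rw [hd]
        simp only [if_true, List.map_cons]
        rw [hrest]
        simp
      · rw [if_neg hg, ih]
        rw [List.map_cons, PySem.Set.ofList_cons, List.filter_cons, hkeep]
        simp only [if_true]
        rw [List.filter_cons]
        have hd : decide (1 < ((xs.filter (fun x => pvKey x == pvKey e)).map pvRec).length) = false := by
          simpa using hg
        rw [hd]
        simp only [Bool.false_eq_true, if_false]
        rw [hrest]

theorem detect_duplicate_spns_main (xs : List (List (String × String))) :
    detect_duplicate_spns xs = detect_duplicate_spns_alt xs := by
  rw [pv_A_eq]
  unfold detect_duplicate_spns_alt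
  rw [pv_B_inv xs xs [] []]
  simp

-- ===== VERDICT (by name: the statement is the Claim_ definition above) =====
theorem detect_duplicate_spns_spec : Claim_equal_detect_duplicate_spns := by
  intro xs _ _
  unfold Spec_detect_duplicate_spns
  exact detect_duplicate_spns_main xs
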